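-- pv_equiv track=rewrite | github.com/yxyxy/HordeForge | cli/horde_cli.py | _extract_log_error_excerpt
-- ===== SOURCE A (Python) =====
-- def _extract_log_error_excerpt(text: str) -> str:
--     if not text:
--         return ""
--     lines = [line.strip() for line in text.splitlines() if line.strip()]
--     if not lines:
--         return ""
--     scored_patterns: list[tuple[int, tuple[str, ...]]] = [
--         (
--             100,
--             (
--                 "failed to push",
--                 "installation not allowed",
--                 "denied:",
--                 "permission denied",
--                 "insufficient_scope",
--             ),
--         ),
--         (
--             80,
--             (
--                 "failed to solve",
--                 "failed to build",
--                 "error:",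
--             ),
--         ),
--         (
--             60,
--             (
--                 "exception",
--                 "traceback",
--                 "fatal",
--             ),
--         ),
--         (
--             40,
--             (
--                 "failed",
--                 "failure",
--                 "denied",
--             ),
--         ),
--     ]
--     noise_tokens = ("liberror-perl", "libcurl", "libexpat", "apt-get install", "fetch ")
--
--     best_line = ""
--     best_score = -1
--     for line in lines:
--         lower = line.lower()
--         if any(token in lower for token in noise_tokens):
--             continue
--         for score, pattern_group in scored_patterns:
--             if any(token in lower for token in pattern_group):
--                 if score > best_score:
--                     best_line = line
--                     best_score = score
--                 break
--     if best_line: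
--         return best_line[:240]
--     return lines[-1][:240]
-- ===== SOURCE B (Python) =====
-- def _extract_log_error_excerpt(text: str) -> str:
--     if not text:
--         return ""
--     lines = [line.strip() for line in text.splitlines() if line.strip()]
--     if not lines:
--         return ""
--     scored_patterns = [
--         (
--             100,
--             (
--                 "failed to push",
--                 "installation not allowed",
--                 "denied:",
--                 "permission denied",
--                 "insufficient_scope",
--             ),
--         ),
--         (80, ("failed to solve", "failed to build", "error:")),
--         (60, ("exception", "traceback", "fatal")),
--         (40, ("failed", "failure", "denied")),
--     ]
--     noise_tokens = ("liberror-perl", "libcurl", "libexpat", "apt-get install", "fetch ")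
--     # tiers are already in descending priority; return the first line of the
--     # highest tier that matches anywhere, instead of tracking a running best.
--     for _score, group in scored_patterns:
--         for line in lines:
--             lower = line.lower()
--             if any(tok in lower for tok in noise_tokens):
--                 continue
--             if any(tok in lower for tok in group):
--                 return line[:240]
--     return lines[-1][:240]
-- ===== Notes on version B (the rewrite author's own statement) =====
-- stated objective: alternative
-- what changed: Replaces the single pass that tracks a running (best_line, best_score) pair and per-line first-matching-tier scoring with tier-priority scans: iterate the tiers in descending score order and return the first non-noise line matching the current tier, with early exit as soon as any tier matches.
import Mathlib
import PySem

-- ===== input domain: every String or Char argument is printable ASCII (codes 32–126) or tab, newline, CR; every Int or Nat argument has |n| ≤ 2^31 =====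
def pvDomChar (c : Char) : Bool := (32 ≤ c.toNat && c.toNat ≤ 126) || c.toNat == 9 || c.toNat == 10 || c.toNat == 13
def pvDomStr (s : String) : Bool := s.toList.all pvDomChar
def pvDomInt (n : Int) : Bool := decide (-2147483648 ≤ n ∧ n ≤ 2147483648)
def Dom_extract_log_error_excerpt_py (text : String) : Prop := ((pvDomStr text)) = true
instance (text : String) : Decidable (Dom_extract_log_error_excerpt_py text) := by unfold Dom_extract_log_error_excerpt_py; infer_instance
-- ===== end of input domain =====

-- B replaces A's single best-score-tracking pass with tier-priority scans (alternative decomposition, not claimed faster); return values only, no mutation.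

-- shared literal tables of the Python source (same in A and B)
def pvGroup1 : List String :=
  ["failed to push", "installation not allowed", "denied:", "permission denied", "insufficient_scope"]
def pvGroup2 : List String := ["failed to solve", "failed to build", "error:"]
def pvGroup3 : List String := ["exception", "traceback", "fatal"]
def pvGroup4 : List String := ["failed", "failure", "denied"]
def pvScoredPatterns : List (Int × List String) :=
  [(100, pvGroup1), (80, pvGroup2), (60, pvGroup3), (40, pvGroup4)]
def pvNoiseTokens : List String :=
  ["liberror-perl", "libcurl", "libexpat", "apt-get install", "fetch "]

-- lines = [line.strip() for line in text.splitlines() if line.strip()]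
def pvCleanLines (text : String) : List String :=
  ((PySem.Str.splitlines text).map PySem.Str.strip).filter (fun l => l ≠ "")

def pvIsNoise (lower : String) : Bool :=
  pvNoiseTokens.any (fun tok => PySem.Str.isIn tok lower)

-- ===== PORT A =====
-- the inner 'for score, pattern_group in scored_patterns: … break' loop of A
def pvFirstScore (lower : String) : List (Int × List String) → Option Int
  | [] => none
  | (score, group) :: rest =>
    if group.any (fun tok => PySem.Str.isIn tok lower) then some score
    else pvFirstScore lower rest

-- one iteration of A's 'for line in lines' loop over the (best_line, best_score) state
def pvStepA (st : String × Int) (line : String) : String × Int :=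
  let lower := PySem.Str.lower line
  if pvIsNoise lower then st
  else
    match pvFirstScore lower pvScoredPatterns with
    | some score => if st.2 < score then (line, score) else st
    | none => st

def extract_log_error_excerpt_py (text : String) : String :=
  if text = "" then ""
  else
    let lines := pvCleanLines text
    if lines = [] then ""
    else
      let best := lines.foldl pvStepA ("", -1)
      if best.1 ≠ "" then PySem.Str.slice best.1 none (some 240)
      else PySem.Str.slice (PySem.List.pyGetD lines (-1) "") none (some 240)

-- ===== PORT B =====
-- B's inner 'for line in lines' scan for one tier
def pvTierMatches (group : List String) (line : String) : Bool :=
  let lower := PySem.Str.lower line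
  !pvIsNoise lower && group.any (fun tok => PySem.Str.isIn tok lower)

-- B's outer 'for _score, group in scored_patterns' loop, early return
def pvTierScan (lines : List String) : List (Int × List String) → Option String
  | [] => none
  | (_, group) :: rest =>
    match lines.find? (pvTierMatches group) with
    | some line => some line
    | none => pvTierScan lines rest

def extract_log_error_excerpt_py_alt (text : String) : String :=
  if text = "" then ""
  else
    let lines := pvCleanLines text
    if lines = [] then ""
    else
      match pvTierScan lines pvScoredPatterns with
      | some line => PySem.Str.slice line none (some 240)
      | none => PySem.Str.slice (PySem.List.pyGetD lines (-1) "") none (some 240)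

-- ===== PRECONDITION & SPEC =====
def Spec_extract_log_error_excerpt_py (text : String) (out : String) : Prop := out = extract_log_error_excerpt_py_alt text
instance (text : String) (out : String) : Decidable (Spec_extract_log_error_excerpt_py text out) := by unfold Spec_extract_log_error_excerpt_py; infer_instance

-- ===== CLAIM (what is proved, stated in full; the proofs are below) =====
def Claim_equal_extract_log_error_excerpt_py : Prop := ∀ (text : String), Dom_extract_log_error_excerpt_py text → Spec_extract_log_error_excerpt_py text (extract_log_error_excerpt_py text)

-- ===== LEMMAS AND PROOFS =====

-- proof-side view of A's per-line computation: the tier score of a line (none = skipped)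
def pvFscore (line : String) : Option Int :=
  let lower := PySem.Str.lower line
  if pvIsNoise lower then none else pvFirstScore lower pvScoredPatterns

def pvHit (group : List String) (line : String) : Bool :=
  group.any (fun tok => PySem.Str.isIn tok (PySem.Str.lower line))

lemma pvStepA_eq (st : String × Int) (line : String) :
    pvStepA st line =
      match pvFscore line with
      | some s => if st.2 < s then (line, s) else st
      | none => st := by
  unfold pvStepA pvFscore
  by_cases h : pvIsNoise (PySem.Str.lower line) <;> simp [h]

lemma pvFscore_eq (l : String) :
    pvFscore l =
      if pvIsNoise (PySem.Str.lower l) then none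
      else if pvHit pvGroup1 l then some 100
      else if pvHit pvGroup2 l then some 80
      else if pvHit pvGroup3 l then some 60
      else if pvHit pvGroup4 l then some 40
      else none := by
  simp only [pvFscore, pvScoredPatterns, pvFirstScore, pvHit]
  rfl

lemma pvFscore_values (l : String) (t : Int) (h : pvFscore l = some t) :
    t = 100 ∨ t = 80 ∨ t = 60 ∨ t = 40 := by
  rw [pvFscore_eq] at h
  split_ifs at h <;> simp_all

lemma pvTierMatches_eq (g : List String) (l : String) :
    pvTierMatches g l = (!pvIsNoise (PySem.Str.lower l) && pvHit g l) := rfl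

lemma pvFscore_100 (l : String) :
    (pvFscore l == some 100) = pvTierMatches pvGroup1 l := by
  rw [pvFscore_eq, pvTierMatches_eq]
  split_ifs <;> simp_all

lemma pvFscore_80 (l : String) (h1 : pvTierMatches pvGroup1 l = false) :
    (pvFscore l == some 80) = pvTierMatches pvGroup2 l := by
  rw [pvTierMatches_eq] at h1
  rw [pvFscore_eq, pvTierMatches_eq]
  split_ifs <;> simp_all

lemma pvFscore_60 (l : String) (h1 : pvTierMatches pvGroup1 l = false)
    (h2 : pvTierMatches pvGroup2 l = false) :
    (pvFscore l == some 60) = pvTierMatches pvGroup3 l := by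
  rw [pvTierMatches_eq] at h1 h2
  rw [pvFscore_eq, pvTierMatches_eq]
  split_ifs <;> simp_all

lemma pvFscore_40 (l : String) (h1 : pvTierMatches pvGroup1 l = false)
    (h2 : pvTierMatches pvGroup2 l = false) (h3 : pvTierMatches pvGroup3 l = false) :
    (pvFscore l == some 40) = pvTierMatches pvGroup4 l := by
  rw [pvTierMatches_eq] at h1 h2 h3
  rw [pvFscore_eq, pvTierMatches_eq]
  split_ifs <;> simp_all

lemma pvFscore_none (l : String) (h1 : pvTierMatches pvGroup1 l = false)
    (h2 : pvTierMatches pvGroup2 l = false) (h3 : pvTierMatches pvGroup3 l = false)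
    (h4 : pvTierMatches pvGroup4 l = false) : pvFscore l = none := by
  rw [pvTierMatches_eq] at h1 h2 h3 h4
  rw [pvFscore_eq]
  split_ifs <;> simp_all

lemma find?_congr_mem {α : Type} (xs : List α) (p q : α → Bool)
    (h : ∀ x ∈ xs, p x = q x) : xs.find? p = xs.find? q := by
  induction xs with
  | nil => rfl
  | cons x xs ih =>
    have hx := h x (by simp)
    by_cases hp : p x = true
    · rw [List.find?_cons_of_pos hp, List.find?_cons_of_pos (hx ▸ hp)]
    · rw [List.find?_cons_of_neg hp,
        List.find?_cons_of_neg (by rw [← hx]; exact hp),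
        ih (fun y hy => h y (by simp [hy]))]

-- once the best score can no longer be beaten, A's fold keeps its state
lemma pvFoldA_stick (lines : List String) (bl : String) (bs : Int)
    (h : ∀ l ∈ lines, ∀ t, pvFscore l = some t → t ≤ bs) :
    lines.foldl pvStepA (bl, bs) = (bl, bs) := by
  induction lines with
  | nil => rfl
  | cons x xs ih =>
    have hstep : pvStepA (bl, bs) x = (bl, bs) := by
      rw [pvStepA_eq]
      cases hfx : pvFscore x with
      | none => rfl
      | some t =>
        have := h x (by simp) t hfx
        simp only []
        rw [if_neg (by omega : ¬ ((bl, bs).2 < t))]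
    rw [List.foldl_cons, hstep]
    exact ih (fun l hl t ht => h l (by simp [hl]) t ht)

-- A's fold lands on the first line scoring s, when no line scores above s
lemma pvFoldA_tier (s : Int) (lines : List String) :
    ∀ (bl : String) (bs : Int) (l : String), bs < s →
    (∀ l' ∈ lines, ∀ t, pvFscore l' = some t → t ≤ s) →
    lines.find? (fun l' => pvFscore l' == some s) = some l →
    lines.foldl pvStepA (bl, bs) = (l, s) := by
  induction lines with
  | nil => intro bl bs l _ _ hfind; simp at hfind
  | cons x xs ih =>
    intro bl bs l hbs hub hfind
    by_cases hx : pvFscore x = some s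
    · rw [List.find?_cons_of_pos (by simp [hx])] at hfind
      have hxl : x = l := by simpa using hfind
      subst hxl
      rw [List.foldl_cons]
      have hstep : pvStepA (bl, bs) x = (x, s) := by
        rw [pvStepA_eq, hx]
        simp only []
        rw [if_pos (by exact hbs : (bl, bs).2 < s)]
      rw [hstep]
      exact pvFoldA_stick xs x s (fun l' hl' t ht => hub l' (by simp [hl']) t ht)
    · rw [List.find?_cons_of_neg (by simp [hx])] at hfind
      rw [List.foldl_cons, pvStepA_eq]
      cases hfx : pvFscore x with
      | none =>
        exact ih bl bs l hbs (fun l' hl' t ht => hub l' (by simp [hl']) t ht) hfind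
      | some t =>
        dsimp only
        have htle : t ≤ s := hub x (by simp) t hfx
        have htlt : t < s := lt_of_le_of_ne htle (by intro h; exact hx (h ▸ hfx))
        by_cases hlt : (bl, bs).2 < t
        · rw [if_pos hlt]
          exact ih x t l htlt (fun l' hl' t' ht' => hub l' (by simp [hl']) t' ht') hfind
        · rw [if_neg hlt]
          exact ih bl bs l hbs (fun l' hl' t' ht' => hub l' (by simp [hl']) t' ht') hfind

lemma pvCleanLines_ne_empty (text : String) (l : String) (h : l ∈ pvCleanLines text) :
    l ≠ "" := by
  unfold pvCleanLines at h
  have := List.mem_filter.1 h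
  simpa using this.2

-- ===== VERDICT (by name: the statement is the Claim_ definition above) =====
theorem extract_log_error_excerpt_py_spec : Claim_equal_extract_log_error_excerpt_py := by
  intro text _
  unfold Spec_extract_log_error_excerpt_py
  unfold extract_log_error_excerpt_py extract_log_error_excerpt_py_alt
  by_cases ht : text = ""
  · simp [ht]
  rw [if_neg ht, if_neg ht]
  by_cases hl : pvCleanLines text = []
  · simp [hl]
  rw [if_neg hl, if_neg hl]
  set lines := pvCleanLines text with hlines
  -- unfold B's tier loop over the literal pattern table
  simp only [pvTierScan, pvScoredPatterns]
  -- values of pvFscore are among the four scores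
  have hvals := fun l t h => pvFscore_values l t h
  rcases h1 : lines.find? (pvTierMatches pvGroup1) with _ | l1
  · have hn1 : ∀ l ∈ lines, pvTierMatches pvGroup1 l = false := by
      intro l hml; simpa using List.find?_eq_none.1 h1 l hml
    rcases h2 : lines.find? (pvTierMatches pvGroup2) with _ | l2
    · have hn2 : ∀ l ∈ lines, pvTierMatches pvGroup2 l = false := by
        intro l hml; simpa using List.find?_eq_none.1 h2 l hml
      rcases h3 : lines.find? (pvTierMatches pvGroup3) with _ | l3
      · have hn3 : ∀ l ∈ lines, pvTierMatches pvGroup3 l = false := by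
          intro l hml; simpa using List.find?_eq_none.1 h3 l hml
        rcases h4 : lines.find? (pvTierMatches pvGroup4) with _ | l4
        · -- nothing matches: fold stays at ("", -1), both take the fallback
          have hn4 : ∀ l ∈ lines, pvTierMatches pvGroup4 l = false := by
            intro l hml; simpa using List.find?_eq_none.1 h4 l hml
          have hfold : lines.foldl pvStepA ("", -1) = ("", -1) := by
            apply pvFoldA_stick
            intro l hml t hft
            have := pvFscore_none l (hn1 l hml) (hn2 l hml) (hn3 l hml) (hn4 l hml)
            rw [this] at hft; cases hft
          rw [hfold]
          simp
        · -- tier 40 fires first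
          have hfold : lines.foldl pvStepA ("", -1) = (l4, 40) := by
            apply pvFoldA_tier 40 lines "" (-1) l4 (by norm_num)
            · intro l' hml t hft
              rcases hvals l' t hft with h | h | h | h
              · exfalso
                have : (pvFscore l' == some 100) = true := by simp [hft, h]
                rw [pvFscore_100] at this; rw [hn1 l' hml] at this; cases this
              · exfalso
                have : (pvFscore l' == some 80) = true := by simp [hft, h]
                rw [pvFscore_80 l' (hn1 l' hml)] at this; rw [hn2 l' hml] at this; cases this
              · exfalso
                have : (pvFscore l' == some 60) = true := by simp [hft, h]
                rw [pvFscore_60 l' (hn1 l' hml) (hn2 l' hml)] at this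
                rw [hn3 l' hml] at this; cases this
              · omega
            · rw [find?_congr_mem lines _ _
                (fun l hml => pvFscore_40 l (hn1 l hml) (hn2 l hml) (hn3 l hml))]
              exact h4
          rw [hfold]
          have hne : l4 ≠ "" := pvCleanLines_ne_empty text l4 (List.mem_of_find?_eq_some h4)
          simp [hne]
      · -- tier 60 fires first
        have hfold : lines.foldl pvStepA ("", -1) = (l3, 60) := by
          apply pvFoldA_tier 60 lines "" (-1) l3 (by norm_num)
          · intro l' hml t hft
            rcases hvals l' t hft with h | h | h | h
            · exfalso
              have : (pvFscore l' == some 100) = true := by simp [hft, h]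
              rw [pvFscore_100] at this; rw [hn1 l' hml] at this; cases this
            · exfalso
              have : (pvFscore l' == some 80) = true := by simp [hft, h]
              rw [pvFscore_80 l' (hn1 l' hml)] at this; rw [hn2 l' hml] at this; cases this
            · omega
            · omega
          · rw [find?_congr_mem lines _ _
              (fun l hml => pvFscore_60 l (hn1 l hml) (hn2 l hml))]
            exact h3
        rw [hfold]
        have hne : l3 ≠ "" := pvCleanLines_ne_empty text l3 (List.mem_of_find?_eq_some h3)
        simp [hne]
    · -- tier 80 fires first
      have hfold : lines.foldl pvStepA ("", -1) = (l2, 80) := by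
        apply pvFoldA_tier 80 lines "" (-1) l2 (by norm_num)
        · intro l' hml t hft
          rcases hvals l' t hft with h | h | h | h
          · exfalso
            have : (pvFscore l' == some 100) = true := by simp [hft, h]
            rw [pvFscore_100] at this; rw [hn1 l' hml] at this; cases this
          · omega
          · omega
          · omega
        · rw [find?_congr_mem lines _ _ (fun l hml => pvFscore_80 l (hn1 l hml))]
          exact h2
      rw [hfold]
      have hne : l2 ≠ "" := pvCleanLines_ne_empty text l2 (List.mem_of_find?_eq_some h2)
      simp [hne]
  · -- tier 100 fires first
    have hfold : lines.foldl pvStepA ("", -1) = (l1, 100) := by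
      apply pvFoldA_tier 100 lines "" (-1) l1 (by norm_num)
      · intro l' hml t hft
        rcases hvals l' t hft with h | h | h | h <;> omega
      · rw [find?_congr_mem lines _ _ (fun l _ => pvFscore_100 l)]
        exact h1
    rw [hfold]
    have hne : l1 ≠ "" := pvCleanLines_ne_empty text l1 (List.mem_of_find?_eq_some h1)
    simp [hne]
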